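-- pv_equiv track=rewrite | github.com/jjsupreme7/refundengine | scripts/import_historical_knowledge.py | _auto_detect_columns
-- ===== SOURCE A (Python) =====
-- from typing import Dict, List, Optional, Tuple
--
-- def _auto_detect_columns(columns: List[str]) -> Dict[str, str]:
--     """
--     Auto-detect which columns contain the key fields we need.
--
--     Args:
--         columns: List of column names from Excel
--
--     Returns:
--         Dictionary mapping field type to actual column name
--     """
--     column_map = {}
--
--     columns_lower = {col: col.lower() for col in columns}
--
--     # Detect Final Decision
--     for col, col_lower in columns_lower.items():
--         if "final" in col_lower and "decision" in col_lower:
--             column_map["final_decision"] = col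
--             break
--
--     # Detect Vendor
--     for col, col_lower in columns_lower.items():
--         if "vendor" in col_lower and "name" in col_lower:
--             column_map["vendor"] = col
--             break
--         elif col_lower == "vendor":
--             column_map["vendor"] = col
--             break
--
--     # Detect Tax Category
--     for col, col_lower in columns_lower.items():
--         if "tax" in col_lower and "category" in col_lower:
--             column_map["tax_category"] = col
--             break
--
--     # Detect Vertex Category
--     for col, col_lower in columns_lower.items():
--         if "vertex" in col_lower and "category" in col_lower:
--             column_map["vertex_category"] = col
--             break
--
--     # Detect Material Group
--     for col, col_lower in columns_lower.items():
--         if "material" in col_lower and "group" in col_lower: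
--             column_map["material_group"] = col
--             break
--
--     # Detect Refund Basis
--     for col, col_lower in columns_lower.items():
--         if "refund" in col_lower and "basis" in col_lower:
--             column_map["refund_basis"] = col
--             break
--         elif col_lower == "basis":
--             column_map["refund_basis"] = col
--             break
--
--     # Detect Description
--     for col, col_lower in columns_lower.items():
--         if "description" in col_lower and "po" in col_lower:
--             column_map["description"] = col
--             break
--         elif col_lower == "description":
--             column_map["description"] = col
--             break
--
--     # Detect Tax Amount
--     for col, col_lower in columns_lower.items():
--         if "total" in col_lower and "tax" in col_lower:
--             column_map["tax_amount"] = col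
--             break
--         elif "tax" in col_lower and "amount" in col_lower:
--             column_map["tax_amount"] = col
--             break
--
--     return column_map
-- ===== SOURCE B (Python) =====
-- def _auto_detect_columns(columns):
--     """Single pass: lowercase each column once, fill each field with the first
--     matching column using a table of (field, predicate) pairs."""
--     fields = [
--         ("final_decision", lambda l: "final" in l and "decision" in l),
--         ("vendor", lambda l: ("vendor" in l and "name" in l) or l == "vendor"),
--         ("tax_category", lambda l: "tax" in l and "category" in l),
--         ("vertex_category", lambda l: "vertex" in l and "category" in l),
--         ("material_group", lambda l: "material" in l and "group" in l),
--         ("refund_basis", lambda l: ("refund" in l and "basis" in l) or l == "basis"),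
--         ("description", lambda l: ("description" in l and "po" in l) or l == "description"),
--         ("tax_amount", lambda l: ("total" in l and "tax" in l) or ("tax" in l and "amount" in l)),
--     ]
--     found = {}
--     for col in columns:
--         low = col.lower()
--         for field, pred in fields:
--             if field not in found and pred(low):
--                 found[field] = col
--     return {field: found[field] for field, _ in fields if field in found}
-- ===== Notes on version B (the rewrite author's own statement) =====
-- stated objective: simpler
-- what changed: Replaces eight copy-pasted break-loops over a precomputed lowercase dict by a data-driven table of (field, predicate) pairs and a single pass over the columns that lowercases each column once and fills every still-empty field whose predicate matches, emitting the result in field order.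
import Mathlib
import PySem

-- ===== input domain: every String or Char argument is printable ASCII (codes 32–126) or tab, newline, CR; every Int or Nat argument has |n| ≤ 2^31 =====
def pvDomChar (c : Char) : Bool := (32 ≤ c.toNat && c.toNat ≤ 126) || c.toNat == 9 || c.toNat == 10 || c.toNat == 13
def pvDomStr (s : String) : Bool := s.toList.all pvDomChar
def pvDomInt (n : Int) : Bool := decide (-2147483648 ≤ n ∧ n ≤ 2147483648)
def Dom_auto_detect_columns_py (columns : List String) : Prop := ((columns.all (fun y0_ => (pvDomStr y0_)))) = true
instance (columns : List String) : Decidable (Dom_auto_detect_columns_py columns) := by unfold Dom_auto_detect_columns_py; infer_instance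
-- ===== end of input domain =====

-- B replaces A's eight copy-pasted break-loops over a lowercase dict by a table of
-- (field, predicate) pairs and a single pass over the columns (objective: simpler).

-- ===== PORT A =====
-- one 'for col, col_lower in columns_lower.items(): if … break elif … break' loop of A
def pvDetect2 (items : List (String × String)) (p q : String → Bool) (key : String)
    (d : PySem.Dict String String) : PySem.Dict String String :=
  match items with
  | [] => d
  | (col, low) :: rest =>
    if p low then d.insert key col
    else if q low then d.insert key col
    else pvDetect2 rest p q key d

def auto_detect_columns_py (columns : List String) : List (String × String) :=
  let column_map : PySem.Dict String String := PySem.Dict.empty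
  let columns_lower : PySem.Dict String String :=
    columns.foldl (fun d col => d.insert col (PySem.Str.lower col)) PySem.Dict.empty
  let items := columns_lower.items
  let column_map := pvDetect2 items (fun l => PySem.Str.isIn "final" l && PySem.Str.isIn "decision" l) (fun _ => false) "final_decision" column_map
  let column_map := pvDetect2 items (fun l => PySem.Str.isIn "vendor" l && PySem.Str.isIn "name" l) (fun l => l == "vendor") "vendor" column_map
  let column_map := pvDetect2 items (fun l => PySem.Str.isIn "tax" l && PySem.Str.isIn "category" l) (fun _ => false) "tax_category" column_map
  let column_map := pvDetect2 items (fun l => PySem.Str.isIn "vertex" l && PySem.Str.isIn "category" l) (fun _ => false) "vertex_category" column_map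
  let column_map := pvDetect2 items (fun l => PySem.Str.isIn "material" l && PySem.Str.isIn "group" l) (fun _ => false) "material_group" column_map
  let column_map := pvDetect2 items (fun l => PySem.Str.isIn "refund" l && PySem.Str.isIn "basis" l) (fun l => l == "basis") "refund_basis" column_map
  let column_map := pvDetect2 items (fun l => PySem.Str.isIn "description" l && PySem.Str.isIn "po" l) (fun l => l == "description") "description" column_map
  let column_map := pvDetect2 items (fun l => PySem.Str.isIn "total" l && PySem.Str.isIn "tax" l) (fun l => PySem.Str.isIn "tax" l && PySem.Str.isIn "amount" l) "tax_amount" column_map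
  column_map.items

-- ===== PORT B =====
def pvFieldTable : List (String × (String → Bool)) :=
  [("final_decision", fun l => PySem.Str.isIn "final" l && PySem.Str.isIn "decision" l),
   ("vendor", fun l => (PySem.Str.isIn "vendor" l && PySem.Str.isIn "name" l) || l == "vendor"),
   ("tax_category", fun l => PySem.Str.isIn "tax" l && PySem.Str.isIn "category" l),
   ("vertex_category", fun l => PySem.Str.isIn "vertex" l && PySem.Str.isIn "category" l),
   ("material_group", fun l => PySem.Str.isIn "material" l && PySem.Str.isIn "group" l),
   ("refund_basis", fun l => (PySem.Str.isIn "refund" l && PySem.Str.isIn "basis" l) || l == "basis"),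
   ("description", fun l => (PySem.Str.isIn "description" l && PySem.Str.isIn "po" l) || l == "description"),
   ("tax_amount", fun l => (PySem.Str.isIn "total" l && PySem.Str.isIn "tax" l) || (PySem.Str.isIn "tax" l && PySem.Str.isIn "amount" l))]

-- the single pass over the columns, filling still-empty fields
def pvScan (columns : List String) : PySem.Dict String String :=
  columns.foldl (fun found col =>
    let low := PySem.Str.lower col
    pvFieldTable.foldl (fun fd fp =>
      if !(PySem.Dict.contains fd fp.1) && fp.2 low then fd.insert fp.1 col else fd) found)
    PySem.Dict.empty

-- the final dict comprehension in field order (distinct keys ⇒ exactly this assoc list)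
def auto_detect_columns_py_alt (columns : List String) : List (String × String) :=
  let found := pvScan columns
  pvFieldTable.filterMap (fun fp => (PySem.Dict.get? found fp.1).map (fun v => (fp.1, v)))

-- ===== PRECONDITION & SPEC =====
def Spec_auto_detect_columns_py (columns : List String) (out : List (String × String)) : Prop := out = auto_detect_columns_py_alt columns
instance (columns : List String) (out : List (String × String)) : Decidable (Spec_auto_detect_columns_py columns out) := by unfold Spec_auto_detect_columns_py; infer_instance

-- ===== CLAIM (what is proved, stated in full; the proofs are below) =====
def Claim_equal_auto_detect_columns_py : Prop := ∀ (columns : List String), Dom_auto_detect_columns_py columns → Spec_auto_detect_columns_py columns (auto_detect_columns_py columns)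

-- ===== LEMMAS AND PROOFS =====

-- first match in the items of A's lowercase dict = first match in the columns list
theorem pv_find_lowerFold (r : String → Bool) (cols : List String) (d : PySem.Dict String String)
    (hinv : ∀ kv ∈ d.items, kv.2 = PySem.Str.lower kv.1) :
    List.find? (fun kv => r kv.2) (cols.foldl (fun d col => d.insert col (PySem.Str.lower col)) d).items
      = (List.find? (fun kv => r kv.2) d.items).or
          ((cols.find? (fun c => r (PySem.Str.lower c))).map (fun c => (c, PySem.Str.lower c))) := by
  induction cols generalizing d with
  | nil => simp
  | cons c cs ih =>
    simp only [List.foldl_cons]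
    by_cases hc : d.contains c = true
    · -- c already a key, with value lower c: the insert leaves the items unchanged
      have hmemc : (c, PySem.Str.lower c) ∈ d.items := by
        have : c ∈ d.keys := (PySem.Dict.contains_iff_mem_keys d c).mp hc
        simp only [PySem.Dict.keys, List.mem_map] at this
        obtain ⟨p, hp, hpc⟩ := this
        have := hinv p hp
        have : p = (c, PySem.Str.lower c) := by cases p; simp_all
        rwa [this] at hp
      have hitems : (d.insert c (PySem.Str.lower c)).items = d.items := by
        rw [PySem.Dict.items_insert_of_contains d (PySem.Str.lower c) hc]
        rw [List.map_congr_left (f := fun p => if p.1 == c then (c, PySem.Str.lower c) else p)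
          (g := fun p => p) ?_]
        · simp
        · intro p hp
          by_cases h : p.1 = c
          · have := hinv p hp
            cases p; simp_all
          · simp [h]
      rw [ih _ (by rw [hitems]; exact hinv), hitems]
      cases hfd : List.find? (fun kv => r kv.2) d.items with
      | some x => simp
      | none =>
        have hrc : r (PySem.Str.lower c) = false := by
          simpa using List.find?_eq_none.mp hfd _ hmemc
        simp [hrc]
    · -- fresh key: the items gain (c, lower c) at the end
      have hc' : d.contains c = false := by simpa using hc
      have hitems : (d.insert c (PySem.Str.lower c)).items = d.items ++ [(c, PySem.Str.lower c)] :=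
        PySem.Dict.items_insert_of_not_contains d (PySem.Str.lower c) hc'
      have hinv' : ∀ kv ∈ (d.insert c (PySem.Str.lower c)).items, kv.2 = PySem.Str.lower kv.1 := by
        rw [hitems]; intro kv hkv
        rcases List.mem_append.mp hkv with h | h
        · exact hinv kv h
        · simp at h; subst h; rfl
      rw [ih _ hinv', hitems, List.find?_append]
      cases hrc : r (PySem.Str.lower c) with
      | true => simp [hrc]
      | false => simp [hrc]

-- characterisation of one A-loop
theorem pv_detect2_eq (items : List (String × String)) (p q : String → Bool) (key : String)
    (d : PySem.Dict String String) :
    pvDetect2 items p q key d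
      = match List.find? (fun kv => p kv.2 || q kv.2) items with
        | some kv => d.insert key kv.1
        | none => d := by
  induction items with
  | nil => simp [pvDetect2]
  | cons kv rest ih =>
    obtain ⟨col, low⟩ := kv
    by_cases hp : p low
    · simp [pvDetect2, hp]
    · by_cases hq : q low
      · simp [pvDetect2, hp, hq]
      · simp [pvDetect2, hp, hq, ih]

-- one fresh-key A-loop appends at most one pair to the result dict
theorem pv_detect2_items (items : List (String × String)) (p q : String → Bool) (key : String)
    (d : PySem.Dict String String) (hk : d.contains key = false) :
    (pvDetect2 items p q key d).items
      = d.items ++ ((List.find? (fun kv => p kv.2 || q kv.2) items).map (fun kv => (key, kv.1))).toList := by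
  rw [pv_detect2_eq]
  cases h : List.find? (fun kv => p kv.2 || q kv.2) items with
  | none => simp
  | some kv => simp [PySem.Dict.items_insert_of_not_contains d kv.1 hk]

-- A's eight sequential loops, as a fold over a stage list (proof-side view of port A)
def pvRunStages (fs : List (String × (String → Bool) × (String → Bool)))
    (items : List (String × String)) (d : PySem.Dict String String) : PySem.Dict String String :=
  fs.foldl (fun d s => pvDetect2 items s.2.1 s.2.2 s.1 d) d

theorem pv_runStages_items (fs : List (String × (String → Bool) × (String → Bool)))
    (items : List (String × String)) (d : PySem.Dict String String)
    (hfs : ∀ s ∈ fs, d.contains s.1 = false) (hnd : (fs.map (·.1)).Nodup) :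
    (pvRunStages fs items d).items
      = d.items ++ fs.flatMap (fun s =>
          ((List.find? (fun kv => s.2.1 kv.2 || s.2.2 kv.2) items).map (fun kv => (s.1, kv.1))).toList) := by
  induction fs generalizing d with
  | nil => simp [pvRunStages]
  | cons s0 rest ih =>
    simp only [List.map_cons, List.nodup_cons] at hnd
    have hk0 : d.contains s0.1 = false := hfs s0 (List.mem_cons_self)
    have hstep : ∀ s ∈ rest, (pvDetect2 items s0.2.1 s0.2.2 s0.1 d).contains s.1 = false := by
      intro s hs
      have hne : s.1 ≠ s0.1 := fun h => hnd.1 (h ▸ List.mem_map.mpr ⟨_, hs, rfl⟩)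
      rw [pv_detect2_eq]
      cases h : List.find? (fun kv => s0.2.1 kv.2 || s0.2.2 kv.2) items with
      | none => exact hfs s (List.mem_cons_of_mem _ hs)
      | some kv =>
        rw [PySem.Dict.contains_insert]
        simp [show (s.1 == s0.1) = false by simpa using hne, hfs s (List.mem_cons_of_mem _ hs)]
    show (pvRunStages rest items (pvDetect2 items s0.2.1 s0.2.2 s0.1 d)).items = _
    rw [ih _ hstep hnd.2, pv_detect2_items items s0.2.1 s0.2.2 s0.1 d hk0]
    simp [List.append_assoc]

theorem pv_table_nodup : (pvFieldTable.map (·.1)).Nodup := by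
  simp only [pvFieldTable, List.map_cons, List.map_nil]
  decide

-- B's inner fold does not touch keys outside the table suffix
theorem pv_inner_get_notmem (fs : List (String × (String → Bool))) (f : String)
    (hnot : f ∉ fs.map (·.1)) (low col : String) (d : PySem.Dict String String) :
    (fs.foldl (fun fd fp =>
      if !(PySem.Dict.contains fd fp.1) && fp.2 low then fd.insert fp.1 col else fd) d).get? f
      = d.get? f := by
  induction fs generalizing d with
  | nil => simp
  | cons a as ih =>
    simp only [List.map_cons, List.mem_cons, not_or] at hnot
    simp only [List.foldl_cons]
    rw [ih hnot.2]
    split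
    · exact PySem.Dict.get?_insert_of_ne _ _ hnot.1
    · rfl

-- B's inner fold, observed at a table key
theorem pv_inner_get (fs : List (String × (String → Bool))) (hnd : (fs.map (·.1)).Nodup)
    (f : String) (p : String → Bool) (hmem : (f, p) ∈ fs) (low col : String)
    (d : PySem.Dict String String) :
    (fs.foldl (fun fd fp =>
      if !(PySem.Dict.contains fd fp.1) && fp.2 low then fd.insert fp.1 col else fd) d).get? f
      = if d.contains f = false ∧ p low = true then some col else d.get? f := by
  induction fs generalizing d with
  | nil => simp at hmem
  | cons fp0 rest ih =>
    obtain ⟨g, q⟩ := fp0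
    simp only [List.map_cons, List.nodup_cons] at hnd
    simp only [List.foldl_cons]
    rcases List.mem_cons.mp hmem with h | hmem'
    · injection h with h1 h2
      subst h1; subst h2
      rw [pv_inner_get_notmem rest f hnd.1]
      by_cases hcf : d.contains f = true
      · simp [hcf]
      · have hcf' : d.contains f = false := by simpa using hcf
        by_cases hp : p low
        · simp [hcf', hp, PySem.Dict.get?_insert_self]
        · simp [hcf', hp]
    · have hgf : g ≠ f := fun h => hnd.1 (h ▸ List.mem_map.mpr ⟨_, hmem', rfl⟩)
      split
      · rw [ih hnd.2 hmem']
        rw [PySem.Dict.get?_insert_of_ne _ _ (Ne.symm hgf)]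
        have hceq : (d.insert g col).contains f = d.contains f := by
          rw [PySem.Dict.contains_insert]
          simp [show (f == g) = false by simpa using Ne.symm hgf]
        rw [hceq]
      · exact ih hnd.2 hmem' d

-- B's single pass, observed at a table key: first matching column
theorem pv_outer_get (cols : List String) (d : PySem.Dict String String)
    (f : String) (p : String → Bool) (hmem : (f, p) ∈ pvFieldTable) :
    (cols.foldl (fun found col =>
      let low := PySem.Str.lower col
      pvFieldTable.foldl (fun fd fp =>
        if !(PySem.Dict.contains fd fp.1) && fp.2 low then fd.insert fp.1 col else fd) found) d).get? f
      = (d.get? f).or (cols.find? (fun c => p (PySem.Str.lower c))) := by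
  induction cols generalizing d with
  | nil => simp
  | cons c cs ih =>
    simp only [List.foldl_cons]
    rw [ih]
    rw [pv_inner_get pvFieldTable pv_table_nodup f p hmem (PySem.Str.lower c) c d]
    by_cases hcf : d.contains f = true
    · have hs : (d.get? f).isSome = true := by
        rw [← PySem.Dict.contains_eq_isSome_get? d f]; exact hcf
      obtain ⟨v, hv⟩ := Option.isSome_iff_exists.mp hs
      simp [hcf, hv]
    · have hcf' : d.contains f = false := by simpa using hcf
      have hget : d.get? f = none := (PySem.Dict.get?_eq_none_iff_contains d f).mpr hcf'
      by_cases hp : p (PySem.Str.lower c) = true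
      · simp [hcf', hp, hget]
      · have hp' : p (PySem.Str.lower c) = false := by simpa using hp
        simp [hcf', hp', hget]

-- the stage list of port A (key, if-predicate, elif-predicate)
def pvStagesA : List (String × (String → Bool) × (String → Bool)) :=
  [("final_decision", fun l => PySem.Str.isIn "final" l && PySem.Str.isIn "decision" l, fun _ => false),
   ("vendor", fun l => PySem.Str.isIn "vendor" l && PySem.Str.isIn "name" l, fun l => l == "vendor"),
   ("tax_category", fun l => PySem.Str.isIn "tax" l && PySem.Str.isIn "category" l, fun _ => false),
   ("vertex_category", fun l => PySem.Str.isIn "vertex" l && PySem.Str.isIn "category" l, fun _ => false),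
   ("material_group", fun l => PySem.Str.isIn "material" l && PySem.Str.isIn "group" l, fun _ => false),
   ("refund_basis", fun l => PySem.Str.isIn "refund" l && PySem.Str.isIn "basis" l, fun l => l == "basis"),
   ("description", fun l => PySem.Str.isIn "description" l && PySem.Str.isIn "po" l, fun l => l == "description"),
   ("tax_amount", fun l => PySem.Str.isIn "total" l && PySem.Str.isIn "tax" l, fun l => PySem.Str.isIn "tax" l && PySem.Str.isIn "amount" l)]

-- ===== VERDICT (by name: the statement is the Claim_ definition above) =====
theorem auto_detect_columns_py_spec : Claim_equal_auto_detect_columns_py := by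
  intro columns _
  show auto_detect_columns_py columns = auto_detect_columns_py_alt columns
  have hA : auto_detect_columns_py columns
      = (pvRunStages pvStagesA
          ((columns.foldl (fun d col => d.insert col (PySem.Str.lower col)) PySem.Dict.empty).items)
          PySem.Dict.empty).items := rfl
  have hempty : (PySem.Dict.empty : PySem.Dict String String).items = [] := rfl
  rw [hA, pv_runStages_items _ _ _ (by intro s hs; simp [PySem.Dict.contains_empty])
        (by simp only [pvStagesA, List.map_cons, List.map_nil]; decide)]
  have hfind : ∀ (r : String → Bool),
      List.find? (fun kv => r kv.2)
        ((columns.foldl (fun d col => d.insert col (PySem.Str.lower col)) PySem.Dict.empty).items)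
      = (columns.find? (fun c => r (PySem.Str.lower c))).map (fun c => (c, PySem.Str.lower c)) := by
    intro r
    rw [pv_find_lowerFold r columns PySem.Dict.empty (by intro kv hkv; rw [hempty] at hkv; simp at hkv)]
    rw [hempty]
    simp
  have hAfun : ∀ (s : String × (String → Bool) × (String → Bool)),
      ((List.find? (fun kv => s.2.1 kv.2 || s.2.2 kv.2)
          ((columns.foldl (fun d col => d.insert col (PySem.Str.lower col)) PySem.Dict.empty).items)).map
        (fun kv => (s.1, kv.1))).toList
      = ((columns.find? (fun c => s.2.1 (PySem.Str.lower c) || s.2.2 (PySem.Str.lower c))).map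
          (fun c => (s.1, c))).toList := by
    intro s
    rw [hfind (fun l => s.2.1 l || s.2.2 l)]
    cases List.find? (fun c => s.2.1 (PySem.Str.lower c) || s.2.2 (PySem.Str.lower c)) columns <;> rfl
  unfold auto_detect_columns_py_alt
  rw [List.filterMap_eq_flatMap_toList]
  have hB : ∀ fp ∈ pvFieldTable,
      ((PySem.Dict.get? (pvScan columns) fp.1).map (fun v => (fp.1, v))).toList
      = ((columns.find? (fun c => fp.2 (PySem.Str.lower c))).map (fun c => (fp.1, c))).toList := by
    intro fp hfp
    have hout := pv_outer_get columns PySem.Dict.empty fp.1 fp.2 (by obtain ⟨a, b⟩ := fp; exact hfp)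
    rw [pvScan, hout]
    simp [PySem.Dict.get?_empty]
  rw [List.flatMap_congr hB, List.flatMap_congr (fun s _ => hAfun s), hempty, List.nil_append]
  simp only [pvStagesA, pvFieldTable, List.flatMap_cons, List.flatMap_nil, List.append_nil]
  simp [Bool.or_false]
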